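-- pv_equiv track=rewrite | github.com/elephear/dqn | src/models/scheduler.py | _check_path_connectivity
-- ===== SOURCE A (Python) =====
-- from typing import Tuple, Dict, Any, Optional
--
-- def _check_path_connectivity(path: list,
--                             network_state: Dict[str, Any]) -> bool:
--     """
--     检查路径连通性
--
--     Args:
--         path: 路径
--         network_state: 网络状态
--
--     Returns:
--         是否连通
--     """
--     if len(path) < 2:
--         return True
--
--     # 获取邻接关系
--     adjacency = {}
--     for link in network_state.get('links', []):
--         src = link.get('src')
--         dst = link.get('dst')
--         if src not in adjacency:
--             adjacency[src] = []
--         if dst not in adjacency: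
--             adjacency[dst] = []
--         adjacency[src].append(dst)
--         adjacency[dst].append(src)  # 无向图
--
--     # 检查路径中相邻节点是否连通
--     for i in range(len(path) - 1):
--         current = path[i]
--         next_node = path[i + 1]
--
--         if current not in adjacency or next_node not in adjacency[current]:
--             return False
--
--     return True
-- ===== SOURCE B (Python) =====
-- from typing import Dict, Any
--
-- def _check_path_connectivity(path: list,
--                             network_state: Dict[str, Any]) -> bool:
--     """Check consecutive path nodes are directly linked (undirected), by
--     scanning the link list for each pair instead of building an adjacency map."""
--     if len(path) < 2:
--         return True
--     links = network_state.get('links', [])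
--     for current, next_node in zip(path, path[1:]):
--         if not any((l.get('src') == current and l.get('dst') == next_node) or
--                    (l.get('src') == next_node and l.get('dst') == current)
--                    for l in links):
--             return False
--     return True
-- ===== Notes on version B (the rewrite author's own statement) =====
-- stated objective: simpler
-- what changed: Drops the adjacency-map construction entirely: B zips the path with its tail and, for each consecutive pair, scans the link list directly for a link joining the pair in either orientation.
import Mathlib
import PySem

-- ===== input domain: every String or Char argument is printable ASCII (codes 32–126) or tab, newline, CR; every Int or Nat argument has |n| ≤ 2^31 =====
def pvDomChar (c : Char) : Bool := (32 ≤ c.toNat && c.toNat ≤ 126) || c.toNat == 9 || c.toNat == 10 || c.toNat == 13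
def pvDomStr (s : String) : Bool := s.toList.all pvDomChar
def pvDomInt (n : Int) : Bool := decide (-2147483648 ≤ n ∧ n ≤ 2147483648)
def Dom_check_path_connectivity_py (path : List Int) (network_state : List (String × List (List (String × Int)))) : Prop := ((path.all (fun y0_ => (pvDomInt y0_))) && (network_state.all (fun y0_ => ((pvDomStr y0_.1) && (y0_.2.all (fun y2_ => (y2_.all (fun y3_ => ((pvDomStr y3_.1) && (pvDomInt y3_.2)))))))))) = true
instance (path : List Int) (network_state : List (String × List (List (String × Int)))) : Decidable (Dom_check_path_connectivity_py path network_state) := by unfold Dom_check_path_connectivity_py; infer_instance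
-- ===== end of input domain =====

-- B drops A's adjacency-map construction and instead scans the link list for each consecutive
-- pair of path nodes (simpler; no speed claim).

-- ===== PORT A =====
-- one iteration of A's adjacency-building loop
def pvStepA (adj : PySem.Dict (Option Int) (List (Option Int))) (link : List (String × Int)) :
    PySem.Dict (Option Int) (List (Option Int)) :=
  let src := (PySem.Dict.mk link).get? "src"
  let dst := (PySem.Dict.mk link).get? "dst"
  let adj := if adj.contains src then adj else adj.insert src []
  let adj := if adj.contains dst then adj else adj.insert dst []
  let adj := adj.modify src [] (fun l => l ++ [dst])
  adj.modify dst [] (fun l => l ++ [src])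

def check_path_connectivity_py (path : List Int) (network_state : List (String × List (List (String × Int)))) : Bool :=
  if path.length < 2 then true
  else
    let adj := (PySem.Dict.getD (PySem.Dict.mk network_state) "links" []).foldl pvStepA PySem.Dict.empty
    (PySem.List.pyRange 0 ((path.length : Int) - 1) 1).foldl
      (fun ok i =>
        ok &&
          (let current := PySem.List.pyGetD path i 0
           let next_node := PySem.List.pyGetD path (i + 1) 0
           match adj.get? (some current) with
           | none => false
           | some lst => lst.contains (some next_node)))
      true

-- ===== PORT B =====
-- does this link join a and b (either orientation)?
def pvConnects (link : List (String × Int)) (a b : Int) : Bool :=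
  let src := (PySem.Dict.mk link).get? "src"
  let dst := (PySem.Dict.mk link).get? "dst"
  (src == some a && dst == some b) || (src == some b && dst == some a)

-- the zip(path, path[1:]) loop of B, as recursion over consecutive pairs
def pvAltGo (links : List (List (String × Int))) : List Int → Bool
  | a :: b :: rest => links.any (fun l => pvConnects l a b) && pvAltGo links (b :: rest)
  | _ => true

def check_path_connectivity_py_alt (path : List Int) (network_state : List (String × List (List (String × Int)))) : Bool :=
  if path.length < 2 then true
  else pvAltGo (PySem.Dict.getD (PySem.Dict.mk network_state) "links" []) path

-- ===== PRECONDITION & SPEC =====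
def Spec_check_path_connectivity_py (path : List Int) (network_state : List (String × List (List (String × Int)))) (out : Bool) : Prop := out = check_path_connectivity_py_alt path network_state
instance (path : List Int) (network_state : List (String × List (List (String × Int)))) (out : Bool) : Decidable (Spec_check_path_connectivity_py path network_state out) := by unfold Spec_check_path_connectivity_py; infer_instance

-- ===== CLAIM (what is proved, stated in full; the proofs are below) =====
def Claim_equal_check_path_connectivity_py : Prop := ∀ (path : List Int) (network_state : List (String × List (List (String × Int)))), Dom_check_path_connectivity_py path network_state → Spec_check_path_connectivity_py path network_state (check_path_connectivity_py path network_state)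

-- ===== LEMMAS AND PROOFS =====

-- A's pair test, phrased on the adjacency dict via getD
def pvPairTest (adj : PySem.Dict (Option Int) (List (Option Int))) (c n : Int) : Bool :=
  (adj.getD (some c) []).contains (some n)

lemma pvPairTest_match (adj : PySem.Dict (Option Int) (List (Option Int))) (c n : Int) :
    (match adj.get? (some c) with
     | none => false
     | some lst => lst.contains (some n)) = pvPairTest adj c n := by
  unfold pvPairTest
  rw [PySem.Dict.getD_eq_get?_getD]
  cases h : adj.get? (some c) <;> simp

lemma pvEnsure_getD (d : PySem.Dict (Option Int) (List (Option Int))) (k x : Option Int) :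
    (if d.contains k then d else d.insert k []).getD x [] = d.getD x [] := by
  split
  · rfl
  · rename_i h
    rw [PySem.Dict.getD_insert]
    split
    · rename_i hx; subst hx
      rw [PySem.Dict.getD_of_not_contains]
      simpa using h
    · rfl

lemma pvAllCongr {α : Type} (l : List α) (f g : α → Bool) (h : ∀ x ∈ l, f x = g x) :
    l.all f = l.all g := by
  induction l with
  | nil => rfl
  | cons x t ih => simp_all

lemma pvStep_getD (adj : PySem.Dict (Option Int) (List (Option Int)))
    (link : List (String × Int)) (c : Int) :
    (pvStepA adj link).getD (some c) [] =
      adj.getD (some c) []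
        ++ (if some c = (PySem.Dict.mk link).get? "src" then [(PySem.Dict.mk link).get? "dst"] else [])
        ++ (if some c = (PySem.Dict.mk link).get? "dst" then [(PySem.Dict.mk link).get? "src"] else []) := by
  unfold pvStepA
  simp only [PySem.Dict.getD_modify, pvEnsure_getD]
  split_ifs <;> simp_all

lemma pvBeqFlip (a b : Option Int) : (a == b) = decide (b = a) := by
  by_cases h : b = a <;> simp_all
  exact fun h' => h h'.symm

lemma pvStep_pairTest (adj : PySem.Dict (Option Int) (List (Option Int)))
    (link : List (String × Int)) (c n : Int) :
    pvPairTest (pvStepA adj link) c n = (pvPairTest adj c n || pvConnects link c n) := by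
  unfold pvPairTest pvConnects
  rw [pvStep_getD]
  split_ifs <;> simp_all [pvBeqFlip]

lemma pvFold_pairTest (links : List (List (String × Int)))
    (adj : PySem.Dict (Option Int) (List (Option Int))) (c n : Int) :
    pvPairTest (links.foldl pvStepA adj) c n
      = (pvPairTest adj c n || links.any (fun l => pvConnects l c n)) := by
  induction links generalizing adj with
  | nil => simp
  | cons l t ih =>
    simp only [List.foldl_cons, List.any_cons, ih, pvStep_pairTest, Bool.or_assoc]

lemma pvFoldl_and (l : List Int) (g : Int → Bool) (b : Bool) :
    l.foldl (fun ok i => ok && g i) b = (b && l.all g) := by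
  induction l generalizing b with
  | nil => simp
  | cons x t ih => simp [ih, Bool.and_assoc]

-- all consecutive pairs satisfy g
def pvAllPairs (g : Int → Int → Bool) : List Int → Bool
  | a :: b :: rest => g a b && pvAllPairs g (b :: rest)
  | _ => true

lemma pvAltGo_eq (links : List (List (String × Int))) (path : List Int) :
    pvAltGo links path = pvAllPairs (fun a b => links.any (fun l => pvConnects l a b)) path := by
  induction path with
  | nil => rfl
  | cons a t ih =>
    cases t with
    | nil => rfl
    | cons b rest => simp only [pvAltGo, pvAllPairs, ih]

lemma pvRangeAll_nat (g : Int → Int → Bool) (path : List Int) :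
    (List.range (path.length - 1)).all
        (fun k => g (path.getD k 0) (path.getD (k + 1) 0)) = pvAllPairs g path := by
  induction path with
  | nil => rfl
  | cons a t ih =>
    cases t with
    | nil => rfl
    | cons b rest =>
      simp only [List.length_cons, Nat.add_sub_cancel]
      rw [List.range_succ_eq_map]
      simp only [List.all_cons, List.all_map]
      have : ((List.range (rest.length + 1 - 1)).all
          (fun k => g ((b :: rest).getD k 0) ((b :: rest).getD (k + 1) 0))) = pvAllPairs g (b :: rest) := ih
      simp only [Nat.add_sub_cancel] at this
      rw [pvAllPairs, ← this]
      refine congrArg₂ (· && ·) rfl ?_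
      apply pvAllCongr
      intro k _
      simp [List.getD]

lemma pvRangeAll (g : Int → Int → Bool) (path : List Int) :
    (PySem.List.pyRange 0 ((path.length : Int) - 1) 1).all
        (fun i => g (PySem.List.pyGetD path i 0) (PySem.List.pyGetD path (i + 1) 0))
      = pvAllPairs g path := by
  rw [PySem.List.pyRange_one]
  rw [List.all_map]
  rw [← pvRangeAll_nat g path]
  have hlen : ((path.length : Int) - 1 - 0).toNat = path.length - 1 := by omega
  rw [hlen]
  apply pvAllCongr
  intro k _
  simp only [Function.comp_apply]
  have h1 : (0 : Int) + (k : Int) = (k : Int) := by ring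
  have h2 : ((k : Int) + 1) = ((k + 1 : Nat) : Int) := by push_cast; ring
  rw [h1, PySem.List.pyGetD_natCast, h2, PySem.List.pyGetD_natCast]

-- ===== VERDICT (by name: the statement is the Claim_ definition above) =====
theorem check_path_connectivity_py_spec : Claim_equal_check_path_connectivity_py := by
  intro path ns _
  unfold Spec_check_path_connectivity_py check_path_connectivity_py check_path_connectivity_py_alt
  split
  · rfl
  · simp only []
    rw [pvFoldl_and, Bool.true_and]
    rw [pvAltGo_eq]
    rw [← pvRangeAll]
    apply pvAllCongr
    intro i _
    rw [pvPairTest_match, pvFold_pairTest]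
    simp [pvPairTest]
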